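-- pv_equiv track=rewrite | github.com/ceph/ceph | src/cephadm/cephadmlib/cluster_ops.py | build_host_daemon_map
-- ===== SOURCE A (Python) =====
-- from typing import Any, Callable, Dict, List, Optional, Tuple
--
-- def build_host_daemon_map(daemons: List[Dict[str, Any]]) -> Dict[str, List[str]]:
--     """Build a map of hostname -> list of daemon types."""
--     host_map: Dict[str, List[str]] = {}
--     for daemon in daemons:
--         hostname = daemon.get('hostname', '')
--         daemon_type = daemon.get('daemon_type', '')
--         if hostname and daemon_type:
--             if hostname not in host_map:
--                 host_map[hostname] = []
--             if daemon_type not in host_map[hostname]: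
--                 host_map[hostname].append(daemon_type)
--     return host_map
-- ===== SOURCE B (Python) =====
-- from typing import Any, Dict, List
--
--
-- def build_host_daemon_map(daemons: List[Dict[str, Any]]) -> Dict[str, List[str]]:
--     """Build a map of hostname -> list of daemon types.
--
--     Dict-free staged shape: flatten the daemons to (hostname, type) pairs,
--     keep the valid ones, list the distinct hosts in first-occurrence order,
--     then for each host collect its distinct types by scanning the pairs.
--     """
--     pairs = [(d.get('hostname', ''), d.get('daemon_type', '')) for d in daemons]
--     valid = [(h, t) for h, t in pairs if h and t]
--     hosts = list(dict.fromkeys(h for h, _ in valid))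
--     return {h: list(dict.fromkeys(t for h2, t in valid if h2 == h))
--             for h in hosts}
-- ===== Notes on version B (the rewrite author's own statement) =====
-- stated objective: alternative
-- what changed: Replaces A's single dedupe-on-insert dict loop by a dict-free staged pipeline: flatten to valid (host, type) pairs, take the distinct hosts in first-occurrence order, then build each host's distinct type list by filtering the pair list per host.
import Mathlib
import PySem

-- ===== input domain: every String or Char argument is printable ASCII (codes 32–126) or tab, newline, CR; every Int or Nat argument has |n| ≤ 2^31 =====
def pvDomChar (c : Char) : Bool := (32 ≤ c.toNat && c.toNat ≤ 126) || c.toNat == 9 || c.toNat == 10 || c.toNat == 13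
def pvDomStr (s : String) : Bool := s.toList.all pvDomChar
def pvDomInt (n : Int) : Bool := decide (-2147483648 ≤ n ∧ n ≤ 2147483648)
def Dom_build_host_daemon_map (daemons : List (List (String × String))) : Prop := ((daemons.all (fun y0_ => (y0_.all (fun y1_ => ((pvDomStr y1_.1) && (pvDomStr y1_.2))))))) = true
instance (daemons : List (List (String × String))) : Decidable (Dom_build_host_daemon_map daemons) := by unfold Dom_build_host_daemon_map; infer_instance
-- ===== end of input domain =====

-- B replaces A's dedupe-on-insert dict loop by a dict-free staged pipeline
-- (valid pairs -> distinct hosts -> per-host filtered distinct types); same cost class.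

-- ===== PORT A =====
-- one iteration of A's loop body
def pvStepA (m : PySem.Dict String (List String)) (daemon : List (String × String)) :
    PySem.Dict String (List String) :=
  let hostname := (PySem.Dict.mk daemon).getD "hostname" ""
  let daemon_type := (PySem.Dict.mk daemon).getD "daemon_type" ""
  if hostname != "" && daemon_type != "" then
    let m := if m.contains hostname then m else m.insert hostname []
    let cur := m.getD hostname []
    if cur.contains daemon_type then m else m.insert hostname (cur ++ [daemon_type])
  else m

def build_host_daemon_map (daemons : List (List (String × String))) : List (String × List String) :=
  (daemons.foldl pvStepA PySem.Dict.empty).items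

-- ===== PORT B =====
-- (d.get('hostname',''), d.get('daemon_type',''))
def pvPair (daemon : List (String × String)) : String × String :=
  ((PySem.Dict.mk daemon).getD "hostname" "", (PySem.Dict.mk daemon).getD "daemon_type" "")

def build_host_daemon_map_alt (daemons : List (List (String × String))) : List (String × List String) :=
  let valid := (daemons.map pvPair).filter (fun p => p.1 != "" && p.2 != "")
  let hosts := PySem.List.dedup (valid.map Prod.fst)
  hosts.map (fun h => (h, PySem.List.dedup ((valid.filter (fun p => p.1 == h)).map Prod.snd)))

-- ===== PRECONDITION & SPEC =====
def Spec_build_host_daemon_map (daemons : List (List (String × String))) (out : List (String × List String)) : Prop := out = build_host_daemon_map_alt daemons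
instance (daemons : List (List (String × String))) (out : List (String × List String)) : Decidable (Spec_build_host_daemon_map daemons out) := by unfold Spec_build_host_daemon_map; infer_instance

-- ===== CLAIM (what is proved, stated in full; the proofs are below) =====
def Claim_equal_build_host_daemon_map : Prop := ∀ (daemons : List (List (String × String))), Dom_build_host_daemon_map daemons → Spec_build_host_daemon_map daemons (build_host_daemon_map daemons)

-- ===== LEMMAS AND PROOFS =====

-- invariant: A's accumulator is determined by the valid pairs ps seen so far
def pvInv (m : PySem.Dict String (List String)) (ps : List (String × String)) : Prop :=
  m.keys.Nodup ∧ m.keys = PySem.Set.ofList (ps.map Prod.fst) ∧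
    ∀ k, m.getD k [] = PySem.Set.ofList ((ps.filter (fun p => p.1 == k)).map Prod.snd)

theorem pvInv_step (m : PySem.Dict String (List String)) (ps : List (String × String))
    (d : List (String × String)) (h : pvInv m ps) :
    pvInv (pvStepA m d)
      (ps ++ (if ((pvPair d).1 != "" && (pvPair d).2 != "") then [pvPair d] else [])) := by
  obtain ⟨hnd, hk, hv⟩ := h
  unfold pvStepA
  by_cases hc : (((PySem.Dict.mk d).getD "hostname" "" != "") &&
      ((PySem.Dict.mk d).getD "daemon_type" "" != "")) = true
  · have hc' : ((pvPair d).1 != "" && (pvPair d).2 != "") = true := hc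
    simp only [hc', if_true, hc]
    set host := (PySem.Dict.mk d).getD "hostname" "" with hhost
    set t := (PySem.Dict.mk d).getD "daemon_type" "" with ht
    have hpair : pvPair d = (host, t) := rfl
    rw [hpair]
    -- splitting the new pair list
    have hfst : (ps ++ [(host, t)]).map Prod.fst = ps.map Prod.fst ++ [host] := by
      simp
    have hfilter : ∀ k, (ps ++ [(host, t)]).filter (fun p => p.1 == k) =
        ps.filter (fun p => p.1 == k) ++ (if host = k then [(host, t)] else []) := by
      intro k
      rw [List.filter_append]
      congr 1
      by_cases hhk : host = k <;> simp [hhk]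
    by_cases hmem : m.contains host = true
    · have hhS : host ∈ PySem.Set.ofList (ps.map Prod.fst) := by
        rw [← hk]; exact (PySem.Dict.contains_iff_mem_keys _ _).mp hmem
      simp only [if_pos hmem]
      by_cases hdup : (m.getD host []).contains t = true
      · -- duplicate type: m unchanged
        simp only [if_pos hdup]
        have htmem : t ∈ PySem.Set.ofList ((ps.filter (fun p => p.1 == host)).map Prod.snd) := by
          rw [← hv host]; exact List.contains_iff_mem.mp hdup
        refine ⟨hnd, ?_, ?_⟩
        · rw [hk, hfst, PySem.Set.ofList_append_singleton, PySem.Set.add_of_mem hhS]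
        · intro k
          rw [hfilter k]
          by_cases hhk : host = k
          · subst hhk
            simp only [if_true, List.map_append, List.map_cons, List.map_nil]
            rw [PySem.Set.ofList_append_singleton, PySem.Set.add_of_mem htmem, hv host]
          · simp only [if_neg hhk, List.append_nil, hv k]
      · -- new type under existing host
        simp only [if_neg hdup]
        have htnm : t ∉ PySem.Set.ofList ((ps.filter (fun p => p.1 == host)).map Prod.snd) := by
          rw [← hv host]; exact fun hm => hdup (List.contains_iff_mem.mpr hm)
        refine ⟨PySem.Dict.nodup_keys_insert _ _ _ hnd, ?_, ?_⟩
        · rw [PySem.Dict.keys_insert_of_contains _ _ hmem, hk, hfst,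
            PySem.Set.ofList_append_singleton, PySem.Set.add_of_mem hhS]
        · intro k
          rw [hfilter k]
          by_cases hhk : host = k
          · subst hhk
            simp only [if_true, List.map_append, List.map_cons, List.map_nil]
            rw [PySem.Dict.getD_insert_self, PySem.Set.ofList_append_singleton,
              PySem.Set.add_of_not_mem htnm, hv host]
          · rw [PySem.Dict.getD_insert_of_ne _ _ _ (fun he => hhk he.symm)]
            simp only [if_neg hhk, List.append_nil, hv k]
    · -- fresh host
      have hmemf : m.contains host = false := by
        revert hmem; cases m.contains host <;> simp
      have hhS : host ∉ PySem.Set.ofList (ps.map Prod.fst) := by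
        rw [← hk]; exact fun hm => hmem ((PySem.Dict.contains_iff_mem_keys _ _).mpr hm)
      have hfempty : ps.filter (fun p => p.1 == host) = [] := by
        rw [List.filter_eq_nil_iff]
        intro p hp hpe
        exact hhS ((PySem.Set.mem_ofList _ _).mpr
          (List.mem_map.mpr ⟨p, hp, by simpa using hpe⟩))
      rw [if_neg hmem]
      rw [PySem.Dict.getD_insert_self]
      have h0 : (([] : List String)).contains t = false := rfl
      simp only [h0, Bool.false_eq_true, if_false]
      rw [PySem.Dict.insert_insert_self]
      refine ⟨PySem.Dict.nodup_keys_insert _ _ _ hnd, ?_, ?_⟩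
      · rw [PySem.Dict.keys_insert_of_not_contains _ _ hmemf, hk, hfst,
          PySem.Set.ofList_append_singleton, PySem.Set.add_of_not_mem hhS]
      · intro k
        rw [hfilter k]
        by_cases hhk : host = k
        · subst hhk
          simp only [if_true]
          rw [PySem.Dict.getD_insert_self, hfempty]
          rfl
        · rw [PySem.Dict.getD_insert_of_ne _ _ _ (fun he => hhk he.symm)]
          simp only [if_neg hhk, List.append_nil, hv k]
  · have hc' : ((pvPair d).1 != "" && (pvPair d).2 != "") = false := by
      revert hc; unfold pvPair; cases hb : (((PySem.Dict.mk d).getD "hostname" "" != "") &&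
        ((PySem.Dict.mk d).getD "daemon_type" "" != "")) <;> simp
    have hc2 : (((PySem.Dict.mk d).getD "hostname" "" != "") &&
        ((PySem.Dict.mk d).getD "daemon_type" "" != "")) = false := hc'
    simp only [hc', hc2, Bool.false_eq_true, if_false, List.append_nil]
    exact ⟨hnd, hk, hv⟩

theorem pvInv_foldl (daemons : List (List (String × String)))
    (m : PySem.Dict String (List String)) (ps : List (String × String)) (h : pvInv m ps) :
    pvInv (daemons.foldl pvStepA m)
      (ps ++ (daemons.map pvPair).filter (fun p => p.1 != "" && p.2 != "")) := by
  induction daemons generalizing m ps with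
  | nil => simpa using h
  | cons d rest ih =>
    have hstep := pvInv_step m ps d h
    have := ih (pvStepA m d) _ hstep
    simp only [List.map_cons, List.foldl_cons]
    rw [List.filter_cons]
    by_cases hc : ((pvPair d).1 != "" && (pvPair d).2 != "") = true
    · simpa [hc, List.append_assoc] using this
    · have hc' : ((pvPair d).1 != "" && (pvPair d).2 != "") = false := by
        revert hc; cases hb : ((pvPair d).1 != "" && (pvPair d).2 != "") <;> simp
      simpa [hc'] using this

-- ===== VERDICT (by name: the statement is the Claim_ definition above) =====
theorem build_host_daemon_map_spec : Claim_equal_build_host_daemon_map := by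
  intro daemons _
  unfold Spec_build_host_daemon_map build_host_daemon_map build_host_daemon_map_alt
  obtain ⟨hnd, hk, hv⟩ := pvInv_foldl daemons PySem.Dict.empty []
    ⟨List.nodup_nil, rfl, fun _ => rfl⟩
  simp only [List.nil_append] at hnd hk hv
  dsimp only
  rw [PySem.Dict.items_eq_map_keys _ hnd [], hk]
  simp only [PySem.List.dedup_eq_ofList]
  exact List.map_congr_left (fun k _ => by rw [hv k])
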